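-- pv_equiv track=rewrite | github.com/doodoo77/SNC_Lab | 01_assistModel/SFT/dataBuild/a11y_preprocess_with_memo.py | _normalize_memo_text
-- ===== SOURCE A (Python) =====
-- def _normalize_memo_text(s: str) -> str:
--     """메모 텍스트 정규화(줄바꿈 통일 + 앞뒤 공백/빈줄 제거)."""
--     s = (s or "").replace("\r\n", "\n").replace("\r", "\n")
--     lines = [ln.rstrip() for ln in s.split("\n")]
--     while lines and not lines[0].strip():
--         lines.pop(0)
--     while lines and not lines[-1].strip():
--         lines.pop()
--     return "\n".join(lines).strip()
-- ===== SOURCE B (Python) =====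
-- def _normalize_memo_text(s: str) -> str:
--     s = (s or "").replace("\r\n", "\n").replace("\r", "\n")
--     lines = [ln.rstrip() for ln in s.split("\n")]
--     first = None
--     last = None
--     for i, ln in enumerate(lines):
--         if ln.strip():
--             if first is None:
--                 first = i
--             last = i
--     if first is None:
--         return ""
--     return "\n".join(lines[first : last + 1]).strip()
-- ===== Notes on version B (the rewrite author's own statement) =====
-- stated objective: alternative
-- what changed: Replaces the two destructive while/pop loops trimming blank lines front and back with a single enumerate pass that records the first and last non-blank line indices and then slices lines[first:last+1] once.
import Mathlib
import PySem

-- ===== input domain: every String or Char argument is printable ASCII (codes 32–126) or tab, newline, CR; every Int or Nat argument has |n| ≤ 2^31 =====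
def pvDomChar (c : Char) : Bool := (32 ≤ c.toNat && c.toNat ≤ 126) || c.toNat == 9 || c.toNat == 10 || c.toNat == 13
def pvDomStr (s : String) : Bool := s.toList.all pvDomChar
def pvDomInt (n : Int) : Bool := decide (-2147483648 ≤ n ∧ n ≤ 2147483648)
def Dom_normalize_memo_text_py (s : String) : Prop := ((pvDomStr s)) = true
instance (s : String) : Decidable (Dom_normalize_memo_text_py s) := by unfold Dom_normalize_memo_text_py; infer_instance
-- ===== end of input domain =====

-- B replaces A's two destructive pop-loops with a single first/last boundary scan plus one slice
-- ('alternative' decomposition, same result). `(s or "")` is the identity on an actual str argument, so both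
-- ports start from the string itself.

-- ===== PORT A =====
-- while lines and not lines[0].strip(): lines.pop(0)
def popFrontA : List (List Char) → List (List Char)
  | [] => []
  | x :: xs => if PySem.Chars.strip x == [] then popFrontA xs else x :: xs

-- while lines and not lines[-1].strip(): lines.pop()
def popBackA (ls : List (List Char)) : List (List Char) :=
  if h : ls = [] then []
  else if PySem.Chars.strip (ls.getLast h) == [] then popBackA ls.dropLast else ls
termination_by ls.length
decreasing_by
  have : 0 < ls.length := List.length_pos_iff.mpr h
  simp [List.length_dropLast]; omega

def normalize_memo_text_py (s : String) : String :=
  let cs := PySem.Chars.replace (PySem.Chars.replace s.toList ['\r', '\n'] ['\n']) ['\r'] ['\n']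
  let lines := (PySem.Chars.splitOn cs ['\n']).map PySem.Chars.rstrip
  String.ofList (PySem.Chars.strip (PySem.Chars.join ['\n'] (popBackA (popFrontA lines))))

-- ===== PORT B =====
def normalize_memo_text_py_alt (s : String) : String :=
  let cs := PySem.Chars.replace (PySem.Chars.replace s.toList ['\r', '\n'] ['\n']) ['\r'] ['\n']
  let lines := (PySem.Chars.splitOn cs ['\n']).map PySem.Chars.rstrip
  let fl := (PySem.List.enumerate lines 0).foldl
    (fun (st : Option Int × Option Int) p =>
      if PySem.Chars.strip p.2 == [] then st
      else ((match st.1 with | none => some p.1 | some f => some f), some p.1))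
    (none, none)
  match fl.1, fl.2 with
  | some f, some l =>
      String.ofList (PySem.Chars.strip (PySem.Chars.join ['\n']
        (PySem.List.slice lines (some f) (some (l + 1)))))
  | _, _ => ""

-- ===== PRECONDITION & SPEC =====
def Spec_normalize_memo_text_py (s : String) (out : String) : Prop := out = normalize_memo_text_py_alt s
instance (s : String) (out : String) : Decidable (Spec_normalize_memo_text_py s out) := by unfold Spec_normalize_memo_text_py; infer_instance

-- ===== CLAIM (what is proved, stated in full; the proofs are below) =====
def Claim_equal_normalize_memo_text_py : Prop := ∀ (s : String), Dom_normalize_memo_text_py s → Spec_normalize_memo_text_py s (normalize_memo_text_py s)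

-- ===== LEMMAS AND PROOFS =====

-- "this line is non-blank" (ln.strip() truthy)
def pvQ (ln : List Char) : Bool := !(PySem.Chars.strip ln == [])

-- index of the LAST element satisfying q
def pvLIdx? {α : Type} (q : α → Bool) : List α → Option Nat
  | [] => none
  | x :: xs =>
    match pvLIdx? q xs with
    | some k => some (k + 1)
    | none => if q x then some 0 else none

theorem pvLIdx?_lt_length {α : Type} (q : α → Bool) (ls : List α) (j : Nat)
    (h : pvLIdx? q ls = some j) : j < ls.length := by
  induction ls generalizing j with
  | nil => simp [pvLIdx?] at h
  | cons x xs ih =>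
    simp only [pvLIdx?] at h
    cases hk : pvLIdx? q xs with
    | some k =>
      rw [hk] at h
      simp only [Option.some.injEq] at h
      have := ih k hk
      simp [← h]; omega
    | none =>
      rw [hk] at h
      by_cases hq : q x = true
      · simp only [hq, if_true, Option.some.injEq] at h
        simp [← h]
      · simp [hq] at h

theorem pvLIdx?_concat {α : Type} (q : α → Bool) (ls : List α) (x : α) :
    pvLIdx? q (ls ++ [x]) = if q x then some ls.length else pvLIdx? q ls := by
  induction ls with
  | nil => simp [pvLIdx?]
  | cons y ys ih =>
    simp only [List.cons_append, pvLIdx?, ih]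
    by_cases hq : q x = true
    · simp [hq]
    · simp [hq]

theorem pvLIdx?_eq_none_iff {α : Type} (q : α → Bool) (ls : List α) :
    pvLIdx? q ls = none ↔ ∀ x ∈ ls, q x = false := by
  induction ls with
  | nil => simp [pvLIdx?]
  | cons x xs ih =>
    simp only [pvLIdx?, List.mem_cons]
    cases hk : pvLIdx? q xs with
    | some k =>
      rw [hk] at ih
      simp only []
      constructor
      · intro h; exact absurd h (by simp)
      · intro h
        have : ∀ y ∈ xs, q y = false := fun y hy => h y (Or.inr hy)
        exact absurd (ih.mpr this) (by simp)
    | none =>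
      rw [hk] at ih
      have hxs := ih.mp rfl
      by_cases hq : q x = true
      · simp [hq]
      · simp only [hq, if_false]
        simp only [Bool.not_eq_true] at hq
        constructor
        · intro _ y hy
          rcases hy with rfl | hy
          · exact hq
          · exact hxs y hy
        · intro _; rfl

theorem pvPopFrontA_eq (ls : List (List Char)) :
    popFrontA ls = match List.findIdx? pvQ ls with
      | none => []
      | some i => ls.drop i := by
  induction ls with
  | nil => simp [popFrontA]
  | cons x xs ih =>
    simp only [popFrontA, List.findIdx?_cons]
    by_cases hb : PySem.Chars.strip x == []
    · have hq : pvQ x = false := by simp [pvQ, hb]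
      rw [if_pos hb, ih]
      simp only [hq, Bool.false_eq_true, if_false]
      cases hi : List.findIdx? pvQ xs <;> simp
    · have hq : pvQ x = true := by simp [pvQ]; simpa using hb
      rw [if_neg hb]
      simp [hq]

theorem pvPopBackA_eq (ls : List (List Char)) :
    popBackA ls = match pvLIdx? pvQ ls with
      | none => []
      | some j => ls.take (j + 1) := by
  induction ls using List.reverseRecOn with
  | nil => simp [popBackA, pvLIdx?]
  | append_singleton ys x ih =>
    have hne : ys ++ [x] ≠ [] := by simp
    rw [popBackA]
    rw [dif_neg hne]
    rw [List.getLast_concat, List.dropLast_concat]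
    rw [pvLIdx?_concat]
    by_cases hb : PySem.Chars.strip x == []
    · have hq : pvQ x = false := by simp [pvQ, hb]
      rw [if_pos hb, ih, hq]
      simp only [Bool.false_eq_true, if_false]
      cases hj : pvLIdx? pvQ ys with
      | none => simp
      | some j =>
        have := pvLIdx?_lt_length pvQ ys j hj
        simp only []
        rw [List.take_append_of_le_length (by omega)]
    · have hq : pvQ x = true := by simp [pvQ]; simpa using hb
      rw [if_neg hb, hq]
      simp only [if_true]
      rw [List.take_of_length_le (by simp)]

theorem pvDrop_lIdx (q : List Char → Bool) (ls : List (List Char)) (i j : Nat)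
    (hf : List.findIdx? q ls = some i) (hl : pvLIdx? q ls = some j) :
    i ≤ j ∧ pvLIdx? q (ls.drop i) = some (j - i) := by
  induction ls generalizing i j with
  | nil => simp [pvLIdx?] at hl
  | cons x xs ih =>
    by_cases hq : q x = true
    · rw [List.findIdx?_cons, if_pos hq] at hf
      have hi : i = 0 := by simpa using hf.symm
      subst hi
      simpa using hl
    · rw [List.findIdx?_cons, if_neg hq] at hf
      cases hf' : List.findIdx? q xs with
      | none => rw [hf'] at hf; simp at hf
      | some i' =>
        rw [hf'] at hf
        simp only [Option.map_some] at hf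
        have hi : i = i' + 1 := by simpa using hf.symm
        subst hi
        simp only [pvLIdx?] at hl
        cases hl' : pvLIdx? q xs with
        | none => rw [hl'] at hl; simp [hq] at hl
        | some k =>
          rw [hl'] at hl
          have hj : j = k + 1 := by simpa using hl.symm
          subst hj
          obtain ⟨h1, h2⟩ := ih i' k hf' hl'
          refine ⟨by omega, ?_⟩
          simpa [Nat.succ_sub_succ] using h2

-- the fold of B computes (first q-index, last q-index), offset by the enumeration start
theorem pvFold_char (ls : List (List Char)) (s : Int) (st : Option Int × Option Int) :
    (PySem.List.enumerate ls s).foldl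
      (fun (st : Option Int × Option Int) p =>
        if PySem.Chars.strip p.2 == [] then st
        else ((match st.1 with | none => some p.1 | some f => some f), some p.1)) st =
    ((match List.findIdx? pvQ ls with
      | none => st.1
      | some i => (match st.1 with | none => some (s + i) | some f => some f)),
     (match pvLIdx? pvQ ls with
      | none => st.2
      | some j => some (s + j))) := by
  induction ls generalizing s st with
  | nil => simp [PySem.List.enumerate_nil, pvLIdx?]
  | cons x xs ih =>
    rw [PySem.List.enumerate_cons, List.foldl_cons, ih]
    by_cases hb : PySem.Chars.strip x == []
    · have hq : pvQ x = false := by simp [pvQ, hb]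
      simp only [hb, if_true]
      cases hf : List.findIdx? pvQ xs <;> cases hl : pvLIdx? pvQ xs <;>
        cases hst : st.1 <;>
        · refine Prod.ext ?_ ?_ <;>
            simp [pvLIdx?, List.findIdx?_cons, hq, hf, hl, hst] <;>
            first | rfl | ring
    · have hq : pvQ x = true := by simp [pvQ]; simpa using hb
      simp only [hb, Bool.false_eq_true, if_false]
      cases hf : List.findIdx? pvQ xs <;> cases hl : pvLIdx? pvQ xs <;>
        cases hst : st.1 <;>
        · refine Prod.ext ?_ ?_ <;>
            simp [pvLIdx?, List.findIdx?_cons, hq, hf, hl, hst] <;>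
            first | rfl | ring

-- the core equality on the shared `lines` value
theorem pvMain (ls : List (List Char)) :
    String.ofList (PySem.Chars.strip (PySem.Chars.join ['\n'] (popBackA (popFrontA ls)))) =
    (let fl := (PySem.List.enumerate ls 0).foldl
        (fun (st : Option Int × Option Int) p =>
          if PySem.Chars.strip p.2 == [] then st
          else ((match st.1 with | none => some p.1 | some f => some f), some p.1))
        (none, none)
     match fl.1, fl.2 with
     | some f, some l =>
         String.ofList (PySem.Chars.strip (PySem.Chars.join ['\n']
           (PySem.List.slice ls (some f) (some (l + 1)))))
     | _, _ => "") := by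
  rw [pvFold_char ls 0 (none, none)]
  rw [pvPopFrontA_eq]
  cases hf : List.findIdx? pvQ ls with
  | none =>
    have hl : pvLIdx? pvQ ls = none := by
      rw [pvLIdx?_eq_none_iff]
      exact List.findIdx?_eq_none_iff.mp hf
    rw [show popBackA [] = [] from by rw [popBackA]; simp]
    rfl
  | some i =>
    cases hl : pvLIdx? pvQ ls with
    | none =>
      exfalso
      have := (pvLIdx?_eq_none_iff pvQ ls).mp hl
      have := List.findIdx?_eq_none_iff.mpr this
      rw [hf] at this; simp at this
    | some j =>
      obtain ⟨hij, hdrop⟩ := pvDrop_lIdx pvQ ls i j hf hl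
      simp only []
      rw [pvPopBackA_eq, hdrop]
      have hz : (0 : Int) + (i : Int) = ((i : Nat) : Int) := by ring
      have hz2 : (0 : Int) + (j : Int) + 1 = (((j + 1 : Nat)) : Int) := by push_cast; ring
      rw [hz, hz2, PySem.List.slice_natCast]
      have : j + 1 - i = j - i + 1 := by omega
      rw [this]

-- ===== VERDICT (by name: the statement is the Claim_ definition above) =====
theorem normalize_memo_text_py_spec : Claim_equal_normalize_memo_text_py := by
  intro s _
  unfold Spec_normalize_memo_text_py normalize_memo_text_py normalize_memo_text_py_alt
  exact pvMain _
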